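-- pv_equiv track=rewrite | github.com/922-Coroiu-Adela/Fundamentals-of-Programming | Assignment5/program.py | get_longest_subarray_same_base_10_digits
-- ===== SOURCE A (Python) =====
-- def get_real(complex_number):
--     return complex_number['real']
--
-- def get_imaginary(complex_number):
--     return complex_number['imaginary']
--
-- def is_same_base_10_digits(cNr1, cNr2):
--     '''
--     Checks if two complex numbers have the same base 10 digits
--     :param cNr1: the first complex number
--     :param cNr2: the second complex number
--     :return: True if the two complex numbers have the same base 10 digits, False otherwise
--     '''
--     digits1 = [0] * 10
--     digits2 = [0] * 10
--     real1 = abs(get_real(cNr1))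
--     imaginary1 = abs(get_imaginary(cNr1))
--     real2 = abs(get_real(cNr2))
--     imaginary2 = abs(get_imaginary(cNr2))
--
--     while real1 != 0:
--         digits1[real1 % 10] = 1
--         real1 //= 10
--     while imaginary1 != 0:
--         digits1[imaginary1 % 10] = 1
--         imaginary1 //= 10
--
--     while real2 != 0:
--         digits2[real2 % 10] = 1
--         real2 //= 10
--     while imaginary2 != 0:
--         digits2[imaginary2 % 10] = 1
--         imaginary2 //= 10
--
--     for i in range(10):
--         if digits1[i] != digits2[i]:
--             return False
--     return True
--
-- def get_longest_subarray_same_base_10_digits(complex_numbers):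
--     '''
--     Gets the longest subarray of numbers where both their real and imaginary parts can be written using the same base 10 digits
--     :param complex_numbers: the list of complex numbers
--     :return: the longest subarray of numbers where both their real and imaginary parts can be written using the same base 10 digits
--     '''
--     longest_subarray = []
--     current_length = 1
--     current_subarray = []
--     for i in range(len(complex_numbers) - 1):
--         if current_length == 1:
--             current_subarray = [complex_numbers[i]]
--         if is_same_base_10_digits(complex_numbers[i], complex_numbers[i + 1]):
--             current_length += 1
--             current_subarray.append(complex_numbers[i + 1])
--         else:
--             if current_length > len(longest_subarray):
--                 longest_subarray = current_subarray
--             current_length = 1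
--             current_subarray = []
--
--     if current_length > len(longest_subarray):
--         longest_subarray = current_subarray
--
--     return longest_subarray
-- ===== SOURCE B (Python) =====
-- def get_longest_subarray_same_base_10_digits(complex_numbers):
--     if len(complex_numbers) < 2:
--         return []
--
--     def signature(c):
--         digits = set()
--         for n in (abs(c['real']), abs(c['imaginary'])):
--             while n != 0:
--                 digits.add(n % 10)
--                 n //= 10
--         return tuple(sorted(digits))
--
--     sigs = [signature(c) for c in complex_numbers]
--
--     # split the list into maximal blocks of equal signatures
--     blocks = []
--     start = 0
--     for i in range(1, len(sigs)):
--         if sigs[i] != sigs[i - 1]: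
--             blocks.append((start, i - start))
--             start = i
--     blocks.append((start, len(sigs) - start))
--
--     best_start, best_len = max(blocks, key=lambda b: b[1])
--     return complex_numbers[best_start:best_start + best_len]
-- ===== Notes on version B (the rewrite author's own statement) =====
-- stated objective: alternative
-- what changed: B drops A's pairwise adjacency test and stateful subarray building entirely: it maps every element once to a canonical digit-set signature (sorted tuple of the decimal digits of |real| and |imaginary|), splits the list into maximal blocks of consecutive equal signatures, and returns the slice of the first longest block picked by one max(key=len); adjacent elements share a digit set iff their signatures are equal, so blocks are exactly A's runs.
import Mathlib
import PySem

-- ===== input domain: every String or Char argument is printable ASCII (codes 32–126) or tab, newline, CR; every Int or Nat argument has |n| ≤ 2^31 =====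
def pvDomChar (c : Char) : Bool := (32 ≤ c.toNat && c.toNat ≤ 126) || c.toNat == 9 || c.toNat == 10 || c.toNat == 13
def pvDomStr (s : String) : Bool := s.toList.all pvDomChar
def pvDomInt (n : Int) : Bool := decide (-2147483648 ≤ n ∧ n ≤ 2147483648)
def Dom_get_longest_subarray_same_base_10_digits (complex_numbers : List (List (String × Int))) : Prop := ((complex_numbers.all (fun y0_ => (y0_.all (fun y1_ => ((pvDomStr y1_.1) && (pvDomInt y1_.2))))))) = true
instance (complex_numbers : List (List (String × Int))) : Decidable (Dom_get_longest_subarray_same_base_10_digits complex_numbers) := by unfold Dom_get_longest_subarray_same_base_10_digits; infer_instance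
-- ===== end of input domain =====

-- B replaces A's stateful run-building pair scan by a per-element digit-set signature
-- (sorted tuple of decimal digits), a split of the list into maximal blocks of equal
-- signatures, and one max (first-longest wins) followed by a single slice;
-- objective: alternative (same asymptotic cost).

-- ===== PORT A =====

-- c['real'] / c['imaginary'] in total form (dict lookup = first match on the
-- association list); Pre_ guarantees the key is present (where it is missing and
-- the element is reached, Python raises KeyError).
def pvDictGetI (c : List (String × Int)) (k : String) : Int :=
  (c.lookup k).getD 0

-- the two 'while x != 0: digits[x % 10] = 1; x //= 10' loops of is_same_base_10_digits
def pvMarkDigits (n : Nat) (d : List Int) : List Int :=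
  if h : n = 0 then d else pvMarkDigits (n / 10) (d.set (n % 10) 1)
termination_by n
decreasing_by exact Nat.div_lt_self (Nat.pos_of_ne_zero h) (by omega)

def pv_is_same_base_10_digits (cNr1 cNr2 : List (String × Int)) : Bool :=
  let d1 := pvMarkDigits (pvDictGetI cNr1 "imaginary").natAbs
              (pvMarkDigits (pvDictGetI cNr1 "real").natAbs (List.replicate 10 (0 : Int)))
  let d2 := pvMarkDigits (pvDictGetI cNr2 "imaginary").natAbs
              (pvMarkDigits (pvDictGetI cNr2 "real").natAbs (List.replicate 10 (0 : Int)))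
  (List.range 10).all (fun i => d1.getD i 0 == d2.getD i 0)

-- the body of A's 'for i in range(len(complex_numbers) - 1)' loop;
-- state = (longest_subarray, current_length, current_subarray)
def pvStepA (cs : List (List (String × Int)))
    (st : List (List (String × Int)) × Int × List (List (String × Int))) (i : Nat) :
    List (List (String × Int)) × Int × List (List (String × Int)) :=
  let cur' := if st.2.1 == 1 then [cs.getD i []] else st.2.2
  if pv_is_same_base_10_digits (cs.getD i []) (cs.getD (i + 1) []) then
    (st.1, st.2.1 + 1, cur' ++ [cs.getD (i + 1) []])
  else
    ((if st.2.1 > (st.1.length : Int) then cur' else st.1), 1, [])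

def get_longest_subarray_same_base_10_digits (complex_numbers : List (List (String × Int))) : List (List (String × Int)) :=
  let r := (List.range (complex_numbers.length - 1)).foldl (pvStepA complex_numbers) ([], 1, [])
  if r.2.1 > (r.1.length : Int) then r.2.2 else r.1

-- ===== PORT B =====

-- the 'while n != 0: digits.add(n % 10); n //= 10' loop of B's signature helper
def pvAddDigits (n : Nat) (s : PySem.Set Int) : PySem.Set Int :=
  if h : n = 0 then s else pvAddDigits (n / 10) (PySem.Set.add s ((n % 10 : Nat) : Int))
termination_by n
decreasing_by exact Nat.div_lt_self (Nat.pos_of_ne_zero h) (by omega)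

-- signature(c) = tuple(sorted(set of decimal digits of |real| and |imaginary|))
def pvSignature (c : List (String × Int)) : List Int :=
  PySem.List.sorted
    (pvAddDigits (pvDictGetI c "imaginary").natAbs
      (pvAddDigits (pvDictGetI c "real").natAbs PySem.Set.empty))
    (fun x => x) false

-- body of B's block-splitting loop 'for i in range(1, len(sigs))'; state = (blocks, start)
def pvStepBlk (sigs : List (List Int)) (st : List (Int × Int) × Int) (i : Int) :
    List (Int × Int) × Int :=
  if PySem.List.pyGetD sigs i [] ≠ PySem.List.pyGetD sigs (i - 1) [] then
    (st.1 ++ [(st.2, i - st.2)], i)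
  else st

def get_longest_subarray_same_base_10_digits_alt (complex_numbers : List (List (String × Int))) :
    List (List (String × Int)) :=
  if complex_numbers.length < 2 then [] else
    let sigs := complex_numbers.map pvSignature
    let st := (PySem.List.pyRange 1 (sigs.length : Int) 1).foldl (pvStepBlk sigs) ([], 0)
    let blocks := st.1 ++ [(st.2, (sigs.length : Int) - st.2)]
    match PySem.List.max? blocks (fun b => b.2) with
    | none => []   -- unreachable: blocks ends in the final block, so it is nonempty
    | some b => PySem.List.slice complex_numbers (some b.1) (some (b.1 + b.2))

-- ===== PRECONDITION & SPEC =====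
-- A raises KeyError when it reaches an element lacking the key 'real' or 'imaginary';
-- elements are reached exactly when the list has at least two entries.
def Pre_get_longest_subarray_same_base_10_digits (complex_numbers : List (List (String × Int))) : Prop :=
  2 ≤ complex_numbers.length →
    ∀ c ∈ complex_numbers, (c.lookup "real").isSome = true ∧ (c.lookup "imaginary").isSome = true
instance (complex_numbers : List (List (String × Int))) : Decidable (Pre_get_longest_subarray_same_base_10_digits complex_numbers) := by unfold Pre_get_longest_subarray_same_base_10_digits; infer_instance

def pvWitness_get_longest_subarray_same_base_10_digits : (List (List (String × Int))) :=
  [[("real", 12), ("imaginary", 21)], [("real", -21), ("imaginary", 102)], [("real", 5), ("imaginary", 0)]]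

def Spec_get_longest_subarray_same_base_10_digits (complex_numbers : List (List (String × Int))) (out : List (List (String × Int))) : Prop := out = get_longest_subarray_same_base_10_digits_alt complex_numbers
instance (complex_numbers : List (List (String × Int))) (out : List (List (String × Int))) : Decidable (Spec_get_longest_subarray_same_base_10_digits complex_numbers out) := by unfold Spec_get_longest_subarray_same_base_10_digits; infer_instance

-- ===== CLAIM (what is proved, stated in full; the proofs are below) =====
def Claim_equal_get_longest_subarray_same_base_10_digits : Prop := ∀ (complex_numbers : List (List (String × Int))), Dom_get_longest_subarray_same_base_10_digits complex_numbers → Pre_get_longest_subarray_same_base_10_digits complex_numbers → Spec_get_longest_subarray_same_base_10_digits complex_numbers (get_longest_subarray_same_base_10_digits complex_numbers)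

-- ===== LEMMAS AND PROOFS =====


-- digit-set bitmask of |n| (proof-only abstraction of both digit loops)
def pvDigitMask (n : Nat) : Nat :=
  if h : n = 0 then 0 else pvDigitMask (n / 10) ||| (1 <<< (n % 10))
termination_by n
decreasing_by exact Nat.div_lt_self (Nat.pos_of_ne_zero h) (by omega)

def pvMask (c : List (String × Int)) : Nat :=
  pvDigitMask (pvDictGetI c "real").natAbs ||| pvDigitMask (pvDictGetI c "imaginary").natAbs

lemma pvDigitMask_lt (n : Nat) : pvDigitMask n < 1024 := by
  induction n using pvDigitMask.induct with
  | case1 => simp [pvDigitMask]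
  | case2 n h ih =>
      rw [pvDigitMask]; simp only [h, dite_false]
      have h10 : n % 10 < 10 := Nat.mod_lt _ (by omega)
      have hs : (1 <<< (n % 10)) < 1024 := by
        rw [Nat.shiftLeft_eq, Nat.one_mul]
        calc 2 ^ (n % 10) < 2 ^ 10 := Nat.pow_lt_pow_right (by omega) h10
        _ = 1024 := by norm_num
      exact Nat.or_lt_two_pow (n := 10) ih hs

lemma pvDigitMask_testBit_ge (n i : Nat) (hi : 10 ≤ i) : (pvDigitMask n).testBit i = false := by
  apply Nat.testBit_lt_two_pow
  calc pvDigitMask n < 1024 := pvDigitMask_lt n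
  _ = 2 ^ 10 := by norm_num
  _ ≤ 2 ^ i := Nat.pow_le_pow_right (by omega) hi

lemma pvMask_lt (c : List (String × Int)) : pvMask c < 1024 :=
  Nat.or_lt_two_pow (n := 10) (pvDigitMask_lt _) (pvDigitMask_lt _)

lemma pvMask_testBit_ge (c : List (String × Int)) (i : Nat) (hi : 10 ≤ i) :
    (pvMask c).testBit i = false := by
  rw [pvMask, Nat.testBit_or, pvDigitMask_testBit_ge _ _ hi, pvDigitMask_testBit_ge _ _ hi]
  rfl

lemma pvMarkDigits_length : ∀ (n : Nat) (d : List Int), (pvMarkDigits n d).length = d.length := by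
  intro n
  induction n using Nat.strong_induction_on with
  | _ n ih =>
      intro d
      by_cases h : n = 0
      · rw [pvMarkDigits]; simp [h]
      · rw [pvMarkDigits]; simp only [h, dite_false]
        rw [ih (n / 10) (Nat.div_lt_self (Nat.pos_of_ne_zero h) (by omega))]
        simp

lemma pvMarkDigits_getD : ∀ (n : Nat) (d : List Int), d.length = 10 → ∀ i, i < 10 →
    (pvMarkDigits n d).getD i 0 = if (pvDigitMask n).testBit i then 1 else d.getD i 0 := by
  intro n
  induction n using Nat.strong_induction_on with
  | _ n ih =>
      intro d hd i hi
      by_cases h : n = 0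
      · rw [pvMarkDigits, pvDigitMask]; simp [h]
      · rw [pvMarkDigits, pvDigitMask]; simp only [h, dite_false]
        rw [ih (n / 10) (Nat.div_lt_self (Nat.pos_of_ne_zero h) (by omega)) _ (by simpa using hd) i hi]
        have h10 : n % 10 < 10 := Nat.mod_lt _ (by omega)
        rw [Nat.testBit_or]
        by_cases hb : (pvDigitMask (n / 10)).testBit i
        · simp [hb]
        · simp only [hb, Bool.false_or]
          by_cases he : i = n % 10
          · have hbit : (1 <<< (n % 10)).testBit i = true := by
              rw [he, Nat.shiftLeft_eq, Nat.one_mul]; exact Nat.testBit_two_pow_self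
            rw [hbit]
            simp only [if_true]
            have hlt : n % 10 < d.length := by omega
            rw [he]
            simp [List.getD, hlt]
          · have hbit : (1 <<< (n % 10)).testBit i = false := by
              rw [Nat.shiftLeft_eq, Nat.one_mul]
              exact Nat.testBit_two_pow_of_ne (fun hx => he (hx.symm))
            rw [hbit]
            simp only [Bool.false_eq_true, if_false]
            simp [List.getD, List.getElem?_set_ne (fun hx => he (hx.symm))]

-- A's pairwise test holds iff the two combined digit masks agree
lemma pv_same_mask (c1 c2 : List (String × Int)) :
    pv_is_same_base_10_digits c1 c2 = true ↔ pvMask c1 = pvMask c2 := by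
  unfold pv_is_same_base_10_digits
  have key : ∀ (c : List (String × Int)) (j : Nat), j < 10 →
      (pvMarkDigits (pvDictGetI c "imaginary").natAbs
          (pvMarkDigits (pvDictGetI c "real").natAbs (List.replicate 10 (0:Int)))).getD j 0
        = if (pvMask c).testBit j then 1 else 0 := by
    intro c j hj
    have hlen : (pvMarkDigits (pvDictGetI c "real").natAbs (List.replicate 10 (0:Int))).length = 10 := by
      rw [pvMarkDigits_length]; simp
    have hrep : (List.replicate 10 (0:Int)).getD j 0 = 0 := by
      rw [List.getD_eq_getElem?_getD, List.getElem?_replicate]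
      simp [hj]
    rw [pvMarkDigits_getD _ _ hlen _ hj, pvMarkDigits_getD _ _ (by simp) _ hj, hrep,
        pvMask, Nat.testBit_or]
    rcases Bool.eq_false_or_eq_true ((pvDigitMask (pvDictGetI c "real").natAbs).testBit j) with hr | hr <;>
      rcases Bool.eq_false_or_eq_true ((pvDigitMask (pvDictGetI c "imaginary").natAbs).testBit j) with him | him <;>
      rw [hr, him] <;> simp
  simp only [List.all_eq_true, List.mem_range, beq_iff_eq]
  constructor
  · intro hall
    apply Nat.eq_of_testBit_eq
    intro j
    by_cases hj : j < 10
    · have hthis := hall j hj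
      rw [key c1 j hj, key c2 j hj] at hthis
      rcases Bool.eq_false_or_eq_true ((pvMask c1).testBit j) with h1 | h1 <;>
        rcases Bool.eq_false_or_eq_true ((pvMask c2).testBit j) with h2 | h2
      · rw [h1, h2]
      · rw [h1, h2] at hthis; norm_num at hthis
      · rw [h1, h2] at hthis; norm_num at hthis
      · rw [h1, h2]
    · rw [pvMask_testBit_ge _ _ (by omega), pvMask_testBit_ge _ _ (by omega)]
  · intro heq j hj
    rw [key c1 j hj, key c2 j hj, heq]

-- B's digit-adding loop: membership and distinctness
lemma mem_pvAddDigits : ∀ (n : Nat) (s : PySem.Set Int) (x : Int),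
    x ∈ pvAddDigits n s ↔ x ∈ s ∨ ∃ d : Nat, (pvDigitMask n).testBit d = true ∧ x = (d : Int) := by
  intro n
  induction n using Nat.strong_induction_on with
  | _ n ih =>
      intro s x
      by_cases h : n = 0
      · rw [pvAddDigits, pvDigitMask]; simp [h]
      · rw [pvAddDigits, pvDigitMask]; simp only [h, dite_false]
        rw [ih (n / 10) (Nat.div_lt_self (Nat.pos_of_ne_zero h) (by omega)), PySem.Set.mem_add]
        constructor
        · rintro ((hs | hx) | ⟨d, hd, hx⟩)
          · exact Or.inl hs
          · refine Or.inr ⟨n % 10, ?_, hx⟩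
            rw [Nat.testBit_or, Nat.shiftLeft_eq, Nat.one_mul, Nat.testBit_two_pow_self]
            simp
          · refine Or.inr ⟨d, ?_, hx⟩
            rw [Nat.testBit_or, hd]; rfl
        · rintro (hs | ⟨d, hd, hx⟩)
          · exact Or.inl (Or.inl hs)
          · rw [Nat.testBit_or] at hd
            rcases Bool.or_eq_true_iff.mp hd with hd1 | hd2
            · exact Or.inr ⟨d, hd1, hx⟩
            · left; right
              have hde : d = n % 10 := by
                by_contra hne
                rw [Nat.shiftLeft_eq, Nat.one_mul, Nat.testBit_two_pow_of_ne (fun hx2 => hne hx2.symm)] at hd2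
                exact Bool.false_ne_true hd2
              rw [hx, hde]

lemma nodup_pvAddDigits : ∀ (n : Nat) (s : PySem.Set Int), s.Nodup → (pvAddDigits n s).Nodup := by
  intro n
  induction n using Nat.strong_induction_on with
  | _ n ih =>
      intro s hs
      by_cases h : n = 0
      · rw [pvAddDigits]; simp [h, hs]
      · rw [pvAddDigits]; simp only [h, dite_false]
        exact ih (n / 10) (Nat.div_lt_self (Nat.pos_of_ne_zero h) (by omega)) _
          (PySem.Set.nodup_add _ _ hs)

-- the canonical strictly increasing list of the digits in a mask
def pvMaskList (m : Nat) : List Int :=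
  List.map (fun d : Nat => (d : Int)) (List.filter (fun d => m.testBit d) (List.range 10))

lemma mem_pvMaskList (m : Nat) (x : Int) :
    x ∈ pvMaskList m ↔ ∃ d : Nat, d < 10 ∧ m.testBit d = true ∧ x = (d : Int) := by
  rw [pvMaskList]
  constructor
  · intro hx
    rcases List.mem_map.mp hx with ⟨d, hd, hxd⟩
    rcases List.mem_filter.mp hd with ⟨hd10, hbit⟩
    exact ⟨d, List.mem_range.mp hd10, hbit, hxd.symm⟩
  · rintro ⟨d, hd10, hbit, hx⟩
    exact List.mem_map.mpr ⟨d, List.mem_filter.mpr ⟨List.mem_range.mpr hd10, hbit⟩, hx.symm⟩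

lemma pairwise_pvMaskList (m : Nat) : (pvMaskList m).Pairwise (fun a b : Int => a < b) := by
  rw [pvMaskList, List.pairwise_map]
  have hp : ((List.range 10).filter (fun d => m.testBit d)).Pairwise (fun a b : Nat => a < b) :=
    (List.pairwise_lt_range).sublist (List.filter_sublist)
  exact hp.imp (fun h => by exact_mod_cast h)

lemma nodup_pvMaskList (m : Nat) : (pvMaskList m).Nodup :=
  (pairwise_pvMaskList m).imp (fun h => ne_of_lt h)

lemma pvMaskList_inj {m1 m2 : Nat} (h1 : m1 < 1024) (h2 : m2 < 1024)
    (h : pvMaskList m1 = pvMaskList m2) : m1 = m2 := by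
  apply Nat.eq_of_testBit_eq
  intro d
  by_cases hd : d < 10
  · have hiff : ∀ m : Nat, ((d : Int) ∈ pvMaskList m ↔ m.testBit d = true) := by
      intro m
      rw [mem_pvMaskList]
      constructor
      · rintro ⟨d', _, hbit, hx⟩
        have : d' = d := by exact_mod_cast hx.symm
        rwa [this] at hbit
      · intro hbit; exact ⟨d, hd, hbit, rfl⟩
    have := (hiff m1).symm.trans (Iff.trans (by rw [h]) (hiff m2))
    rcases Bool.eq_false_or_eq_true (m1.testBit d) with hb1 | hb1 <;>
      rcases Bool.eq_false_or_eq_true (m2.testBit d) with hb2 | hb2 <;>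
      simp_all
  · rw [Nat.testBit_lt_two_pow (by calc m1 < 1024 := h1
        _ = 2 ^ 10 := by norm_num
        _ ≤ 2 ^ d := Nat.pow_le_pow_right (by omega) (by omega)),
      Nat.testBit_lt_two_pow (by calc m2 < 1024 := h2
        _ = 2 ^ 10 := by norm_num
        _ ≤ 2 ^ d := Nat.pow_le_pow_right (by omega) (by omega))]

-- B's signature in closed form: the sorted digit set is the mask's digit list
lemma pvSignature_eq (c : List (String × Int)) : pvSignature c = pvMaskList (pvMask c) := by
  unfold pvSignature
  apply PySem.List.sorted_eq_of_perm_of_pairwise_lt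
  · refine (List.perm_ext_iff_of_nodup (nodup_pvMaskList _)
      (nodup_pvAddDigits _ _ (nodup_pvAddDigits _ _ List.nodup_nil))).mpr ?_
    intro x
    rw [mem_pvMaskList, mem_pvAddDigits, mem_pvAddDigits]
    simp only [List.not_mem_nil, false_or]
    constructor
    · rintro ⟨d, _, hbit, hx⟩
      rw [pvMask, Nat.testBit_or] at hbit
      rcases Bool.or_eq_true_iff.mp hbit with hb | hb
      · exact Or.inl ⟨d, hb, hx⟩
      · exact Or.inr ⟨d, hb, hx⟩
    · rintro (⟨d, hbit, hx⟩ | ⟨d, hbit, hx⟩)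
      · have hd10 : d < 10 := by
          by_contra hge
          rw [pvDigitMask_testBit_ge _ _ (by omega)] at hbit
          exact Bool.false_ne_true hbit
        refine ⟨d, hd10, ?_, hx⟩
        rw [pvMask, Nat.testBit_or, hbit]; rfl
      · have hd10 : d < 10 := by
          by_contra hge
          rw [pvDigitMask_testBit_ge _ _ (by omega)] at hbit
          exact Bool.false_ne_true hbit
        refine ⟨d, hd10, ?_, hx⟩
        rw [pvMask, Nat.testBit_or, hbit]
        simp
  · exact pairwise_pvMaskList _

-- the bridge: A's pairwise test is exactly equality of B's signatures
lemma pv_same_iff (c1 c2 : List (String × Int)) :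
    pv_is_same_base_10_digits c1 c2 = true ↔ pvSignature c1 = pvSignature c2 := by
  rw [pv_same_mask, pvSignature_eq, pvSignature_eq]
  constructor
  · intro h; rw [h]
  · exact fun h => pvMaskList_inj (pvMask_lt c1) (pvMask_lt c2) h

-- abbreviations for the two loop states after the first k iterations (proof-only)
def pvF (cs : List (List (String × Int))) (i : Nat) : Bool :=
  pv_is_same_base_10_digits (cs.getD i []) (cs.getD (i + 1) [])

def pvA (cs : List (List (String × Int))) (k : Nat) :
    List (List (String × Int)) × Int × List (List (String × Int)) :=
  (List.range k).foldl (pvStepA cs) ([], 1, [])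

def pvBlk (cs : List (List (String × Int))) (k : Nat) : List (Int × Int) × Int :=
  (List.range k).foldl (fun st (j : Nat) => pvStepBlk (cs.map pvSignature) st (1 + (j : Int))) ([], 0)

lemma pvA_succ (cs : List (List (String × Int))) (k : Nat) :
    pvA cs (k + 1) = pvStepA cs (pvA cs k) k := by
  unfold pvA; rw [List.range_succ, List.foldl_append, List.foldl_cons, List.foldl_nil]

lemma pvBlk_succ (cs : List (List (String × Int))) (k : Nat) :
    pvBlk cs (k + 1) = pvStepBlk (cs.map pvSignature) (pvBlk cs k) (1 + (k : Int)) := by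
  unfold pvBlk; rw [List.range_succ, List.foldl_append, List.foldl_cons, List.foldl_nil]

lemma pv_getD_map_sig (cs : List (List (String × Int))) (m : Nat) (h : m < cs.length) :
    (cs.map pvSignature).getD m [] = pvSignature (cs.getD m []) := by
  have h' : m < (cs.map pvSignature).length := by simpa using h
  rw [List.getD_eq_getElem?_getD, List.getElem?_eq_getElem h', List.getElem_map,
      List.getD_eq_getElem?_getD, List.getElem?_eq_getElem h]
  rfl

-- B's block step in terms of A's adjacency test
lemma pvStepBlk_eq (cs : List (List (String × Int))) (st : List (Int × Int) × Int) (j : Nat)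
    (hj : j + 1 < cs.length) :
    pvStepBlk (cs.map pvSignature) st (1 + (j : Int)) =
      if pvF cs j = true then st else (st.1 ++ [(st.2, 1 + (j : Int) - st.2)], 1 + (j : Int)) := by
  have hg1 : PySem.List.pyGetD (cs.map pvSignature) (1 + (j : Int)) [] = pvSignature (cs.getD (j + 1) []) := by
    have h1 : (1 : Int) + (j : Int) = ((j + 1 : Nat) : Int) := by push_cast; ring
    rw [h1, PySem.List.pyGetD_natCast, pv_getD_map_sig cs (j + 1) hj]
  have hg0 : PySem.List.pyGetD (cs.map pvSignature) (1 + (j : Int) - 1) [] = pvSignature (cs.getD j []) := by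
    have h0 : (1 : Int) + (j : Int) - 1 = ((j : Nat) : Int) := by ring
    rw [h0, PySem.List.pyGetD_natCast, pv_getD_map_sig cs j (by omega)]
  rw [pvStepBlk, hg1, hg0]
  by_cases ht : pvF cs j = true
  · have heq := (pv_same_iff (cs.getD j []) (cs.getD (j + 1) [])).mp ht
    rw [if_pos ht, if_neg (fun hne => hne heq.symm)]
  · rw [if_neg ht, if_pos (fun heq => ht ((pv_same_iff _ _).mpr heq.symm))]

-- first-maximum fold underlying Python's max(..., key=len)
def pvBest (b0 : Int × Int) (bs : List (Int × Int)) : Int × Int :=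
  bs.foldl (fun best b => if best.2 < b.2 then b else best) b0

lemma pv_max?_cons (b0 : Int × Int) (bs : List (Int × Int)) :
    PySem.List.max? (b0 :: bs) (fun b => b.2) = some (pvBest b0 bs) := by
  induction bs generalizing b0 with
  | nil => rfl
  | cons x t ih =>
      have step : PySem.List.max? (b0 :: x :: t) (fun b : Int × Int => b.2)
          = PySem.List.max? ((if b0.2 < x.2 then x else b0) :: t) (fun b => b.2) := by
        simp only [PySem.List.max?, List.foldl_cons]
        by_cases hx : b0.2 < x.2 <;> simp [hx]
      rw [step, ih]
      by_cases hx : b0.2 < x.2 <;> simp [pvBest, hx]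

lemma pvBest_append (b0 : Int × Int) (bs : List (Int × Int)) (b : Int × Int) :
    pvBest b0 (bs ++ [b]) = if (pvBest b0 bs).2 < b.2 then b else pvBest b0 bs := by
  simp [pvBest, List.foldl_append]

-- slices of cs in drop/take form: basic facts
lemma pv_take_one (cs : List (List (String × Int))) (k : Nat) (hk : k < cs.length) :
    (cs.drop k).take 1 = [cs.getD k []] := by
  rw [List.take_one, List.head?_drop, List.getElem?_eq_getElem hk]
  simp [List.getD, List.getElem?_eq_getElem hk]

lemma pv_take_ext (cs : List (List (String × Int))) (a t : Nat) (h : a + t < cs.length) :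
    (cs.drop a).take t ++ [cs.getD (a + t) []] = (cs.drop a).take (t + 1) := by
  rw [List.take_add_one]
  congr 1
  rw [List.getElem?_drop, List.getElem?_eq_getElem h]
  simp [List.getD, List.getElem?_eq_getElem h]

lemma pv_len_chunk (cs : List (List (String × Int))) (p q : Nat) (h : p + q ≤ cs.length) :
    ((cs.drop p).take q).length = q := by
  simp only [List.length_take, List.length_drop]; omega

-- the main loop invariant: r is the length of the current trailing run of matches;
-- the committed blocks of B carry (via the first-max fold) exactly A's longest subarray
lemma pvInv (cs : List (List (String × Int))) (hN : 2 ≤ cs.length) :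
    ∀ k, k ≤ cs.length - 1 →
    ∃ r : Nat, r ≤ k ∧
      (pvBlk cs k).2 = (k : Int) - (r : Int) ∧
      (pvA cs k).2.1 = (r : Int) + 1 ∧
      (pvA cs k).2.2 = (if r = 0 then [] else (cs.drop (k - r)).take (r + 1)) ∧
      (((pvBlk cs k).1 = [] ∧ (pvA cs k).1 = [] ∧ r = k)
       ∨ (∃ b0 bs p q, (pvBlk cs k).1 = b0 :: bs ∧
            pvBest b0 bs = (((p : Nat) : Int), ((q : Nat) : Int)) ∧
            1 ≤ q ∧ p + q ≤ cs.length ∧ (pvA cs k).1 = (cs.drop p).take q)) := by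
  intro k
  induction k with
  | zero =>
      intro _
      exact ⟨0, le_rfl, by simp [pvBlk], by simp [pvA], by simp [pvA],
        Or.inl (by simp [pvA, pvBlk])⟩
  | succ k ih =>
      intro hk1
      have hk : k ≤ cs.length - 1 := by omega
      have hklt : k + 1 < cs.length := by omega
      obtain ⟨r, hrk, hst, hc, hsub, hdisj⟩ := ih hk
      rw [pvA_succ, pvBlk_succ, pvStepBlk_eq cs _ k hklt]
      have htA : pv_is_same_base_10_digits (cs.getD k []) (cs.getD (k + 1) []) = pvF cs k := rfl
      -- cur' of A's step, in closed form
      have hcur' : (if (pvA cs k).2.1 == 1 then [cs.getD k []] else (pvA cs k).2.2)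
          = (cs.drop (k - r)).take (r + 1) := by
        by_cases hr0 : r = 0
        · subst hr0
          rw [hc, Nat.sub_zero, pv_take_one cs k (by omega)]
          norm_num
        · have hb : ((pvA cs k).2.1 == 1) = false := by
            rw [hc]; simp only [beq_eq_false_iff_ne, ne_eq]; intro hx
            have : (r : Int) = 0 := by omega
            exact hr0 (by exact_mod_cast this)
          rw [hb, hsub, if_neg hr0]
          rfl
      by_cases ht : pvF cs k = true
      -- the pair (k, k+1) matches: the run extends, the block stays open
      · have hstA : pvStepA cs (pvA cs k) k
            = ((pvA cs k).1, (pvA cs k).2.1 + 1,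
               (cs.drop (k - r)).take (r + 1) ++ [cs.getD (k + 1) []]) := by
          rw [pvStepA]; rw [htA, ht]; simp only [if_true, hcur']
        have hext : (cs.drop (k - r)).take (r + 1) ++ [cs.getD (k + 1) []]
            = (cs.drop (k + 1 - (r + 1))).take (r + 1 + 1) := by
          have h1 : k - r + (r + 1) = k + 1 := by omega
          have h2 : k + 1 - (r + 1) = k - r := by omega
          rw [h2, ← pv_take_ext cs (k - r) (r + 1) (by omega), h1]
        rw [if_pos ht]
        refine ⟨r + 1, by omega, ?_, ?_, ?_, ?_⟩
        · rw [hst]; push_cast; ring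
        · rw [hstA]; simp only [hc]; push_cast; ring
        · rw [hstA]; simp only [hext]
          rw [if_neg (by omega)]
        · rcases hdisj with ⟨hB, hL, hrk'⟩ | ⟨b0, bs, p, q, hB, hbest, hq1, hpq, hL⟩
          · exact Or.inl ⟨hB, by rw [hstA, hL], by omega⟩
          · exact Or.inr ⟨b0, bs, p, q, hB, hbest, hq1, hpq, by rw [hstA, hL]⟩
      -- mismatch: A commits the run, B closes the block
      · have ht' : pvF cs k = false := by revert ht; cases pvF cs k <;> simp
        rw [if_neg (by rw [ht']; exact Bool.false_ne_true)]
        have hstA : pvStepA cs (pvA cs k) k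
            = ((if (pvA cs k).2.1 > ((pvA cs k).1.length : Int)
                then (cs.drop (k - r)).take (r + 1) else (pvA cs k).1), 1, []) := by
          rw [pvStepA]; rw [htA, ht']; simp only [Bool.false_eq_true, if_false, hcur']
        have hblock : ((pvBlk cs k).2, 1 + (k : Int) - (pvBlk cs k).2)
            = (((k - r : Nat) : Int), ((r + 1 : Nat) : Int)) := by
          rw [hst]
          have hx : 1 + (k : Int) - ((k : Int) - (r : Int)) = ((r + 1 : Nat) : Int) := by
            push_cast; ring
          have hy : (k : Int) - (r : Int) = ((k - r : Nat) : Int) := by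
            have : r ≤ k := hrk
            push_cast [this]
            ring
          rw [hx, hy]
        refine ⟨0, by omega, ?_, by rw [hstA]; norm_num, by rw [hstA]; simp, ?_⟩
        · show (1 + (k : Int)) = ((k + 1 : Nat) : Int) - ((0 : Nat) : Int)
          push_cast; ring
        · right
          rcases hdisj with ⟨hB, hL, hrk'⟩ | ⟨b0, bs, p, q, hB, hbest, hq1, hpq, hL⟩
          · -- no block closed yet: the first block becomes the best
            refine ⟨(((k - r : Nat) : Int), ((r + 1 : Nat) : Int)), [], k - r, r + 1,
              ?_, by simp [pvBest], by omega, by omega, ?_⟩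
            · rw [hB]; simp only [List.nil_append]
              rw [hblock]
            · rw [hstA, hL, hc]
              rw [if_pos (by simp only [List.length_nil, Nat.cast_zero]; omega)]
          · have hlen : (((pvA cs k).1.length : Nat) : Int) = (q : Int) := by
              rw [hL, pv_len_chunk cs p q hpq]
            by_cases hqr : (q : Int) < (r : Int) + 1
            · -- the committed run is strictly longer: it becomes the best block
              refine ⟨b0, bs ++ [(((k - r : Nat) : Int), ((r + 1 : Nat) : Int))], k - r, r + 1,
                ?_, ?_, by omega, by omega, ?_⟩
              · rw [hB]; simp only [List.cons_append]
                rw [hblock]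
              · rw [pvBest_append, hbest]
                rw [if_pos (by push_cast; omega)]
              · rw [hstA, hc, hL]
                rw [← hL, if_pos (by rw [hL, pv_len_chunk cs p q hpq]; omega)]
            · -- not longer: the best block is unchanged
              refine ⟨b0, bs ++ [(((k - r : Nat) : Int), ((r + 1 : Nat) : Int))], p, q,
                ?_, ?_, hq1, hpq, ?_⟩
              · rw [hB]; simp only [List.cons_append]
                rw [hblock]
              · rw [pvBest_append, hbest]
                rw [if_neg (by push_cast; omega)]
              · rw [hstA, hc, ← hL]
                rw [if_neg (by rw [hL, pv_len_chunk cs p q hpq]; omega), hL]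

-- ===== VERDICT (by name: the statement is the Claim_ definition above) =====
theorem get_longest_subarray_same_base_10_digits_spec : Claim_equal_get_longest_subarray_same_base_10_digits := by
  unfold Claim_equal_get_longest_subarray_same_base_10_digits
  intro cs _ _
  unfold Spec_get_longest_subarray_same_base_10_digits
  by_cases hN : cs.length < 2
  · have hA : get_longest_subarray_same_base_10_digits cs = [] := by
      have h0 : cs.length - 1 = 0 := by omega
      simp only [get_longest_subarray_same_base_10_digits, h0, List.range_zero, List.foldl_nil]
      norm_num
    have hB : get_longest_subarray_same_base_10_digits_alt cs = [] := by
      simp only [get_longest_subarray_same_base_10_digits_alt]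
      rw [if_pos hN]
    rw [hA, hB]
  · have hN2 : 2 ≤ cs.length := by omega
    have hK1 : 1 ≤ cs.length - 1 := by omega
    -- A's fold in pvA form
    have hA : get_longest_subarray_same_base_10_digits cs
        = (if (pvA cs (cs.length - 1)).2.1 > ((pvA cs (cs.length - 1)).1.length : Int)
           then (pvA cs (cs.length - 1)).2.2 else (pvA cs (cs.length - 1)).1) := rfl
    -- B's fold in pvBlk form
    have hlen : (cs.map pvSignature).length = cs.length := List.length_map _
    have hfold : (PySem.List.pyRange 1 (((cs.map pvSignature).length : Nat) : Int) 1).foldl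
        (pvStepBlk (cs.map pvSignature)) ([], 0) = pvBlk cs (cs.length - 1) := by
      rw [hlen, PySem.List.pyRange_one]
      have hto : ((cs.length : Int) - 1).toNat = cs.length - 1 := by omega
      rw [hto, List.foldl_map]
      rfl
    have hB : get_longest_subarray_same_base_10_digits_alt cs
        = (match PySem.List.max? ((pvBlk cs (cs.length - 1)).1
              ++ [((pvBlk cs (cs.length - 1)).2, ((cs.length : Nat) : Int) - (pvBlk cs (cs.length - 1)).2)])
              (fun b => b.2) with
           | none => []
           | some b => PySem.List.slice cs (some b.1) (some (b.1 + b.2))) := by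
      simp only [get_longest_subarray_same_base_10_digits_alt]
      rw [if_neg hN, hfold, hlen]
    rw [hA, hB]
    obtain ⟨r, hrk, hst, hc, hsub, hdisj⟩ := pvInv cs hN2 (cs.length - 1) le_rfl
    have hbv : ((pvBlk cs (cs.length - 1)).2, ((cs.length : Nat) : Int) - (pvBlk cs (cs.length - 1)).2)
        = (((cs.length - 1 - r : Nat) : Int), ((r + 1 : Nat) : Int)) := by
      rw [hst]
      have h1 : ((cs.length - 1 : Nat) : Int) - (r : Int) = ((cs.length - 1 - r : Nat) : Int) := by
        push_cast [hrk]; ring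
      have h2 : ((cs.length : Nat) : Int) - (((cs.length - 1 : Nat) : Int) - (r : Int))
          = ((r + 1 : Nat) : Int) := by
        omega
      rw [h2, h1]
    rcases hdisj with ⟨hBlk, hL, hrk'⟩ | ⟨b0, bs, p, q, hBlk, hbest, hq1, hpq, hL⟩
    · -- all adjacent pairs matched: the single block is the whole list
      have hr0 : r ≠ 0 := by omega
      rw [hBlk, List.nil_append, hbv, pv_max?_cons]
      have hpb : pvBest (((cs.length - 1 - r : Nat) : Int), ((r + 1 : Nat) : Int)) [] =
          (((cs.length - 1 - r : Nat) : Int), ((r + 1 : Nat) : Int)) := rfl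
      rw [hpb]
      simp only
      rw [PySem.List.slice_natCast_add]
      rw [hc, hL, hsub, if_pos (by simp only [List.length_nil, Nat.cast_zero]; omega), if_neg hr0]
    · -- general case: Python's max over the closed blocks plus the final open block
      have hlenL : ((pvA cs (cs.length - 1)).1.length : Int) = (q : Int) := by
        rw [hL, pv_len_chunk cs p q hpq]
      rw [hBlk, List.cons_append, hbv, pv_max?_cons, pvBest_append, hbest]
      by_cases hqr : (q : Int) < (r : Int) + 1
      · have hr0 : r ≠ 0 := by
          intro h0; rw [h0] at hqr; push_cast at hqr; omega
        rw [if_pos (show Prod.snd ((p : Int), (q : Int)) < Prod.snd (((cs.length - 1 - r : Nat) : Int), ((r + 1 : Nat) : Int)) by push_cast; omega)]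
        simp only
        rw [PySem.List.slice_natCast_add]
        rw [hc, hsub, if_pos (by rw [hlenL]; omega), if_neg hr0]
      · rw [if_neg (show ¬ Prod.snd ((p : Int), (q : Int)) < Prod.snd (((cs.length - 1 - r : Nat) : Int), ((r + 1 : Nat) : Int)) by push_cast; omega)]
        simp only
        rw [PySem.List.slice_natCast_add]
        rw [hc, if_neg (by rw [hlenL]; omega), hL]
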